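-- pv_equiv track=rewrite | github.com/zaha27/andMD | laboratoare/laborator12/problema1/functions.py | elementele_minimale
-- ===== SOURCE A (Python) =====
-- def elementele_minimale(graf):
--     lista = []
--     toate = []
--     for nod in graf:
--         toate.append(nod)
--
--     frecventa = []
--     for nod in graf :
--         lista_nod = graf[nod]
--         for i in lista_nod :
--             frecventa.append(i)
--     lista = list(set(toate) - set(frecventa))
--     return lista
-- ===== SOURCE B (Python) =====
-- def elementele_minimale(graf):
--     return list({n for n in graf if not any(n in graf[m] for m in graf)})
-- ===== Notes on version B (the rewrite author's own statement) =====
-- stated objective: alternative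
-- what changed: Instead of materialising the key list and the flattened edge-target list and subtracting them as sets, B does a direct nested membership scan: a node is minimal iff no adjacency list contains it (brute-force O(V*E) test per node, no target collection is ever built).
import Mathlib
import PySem

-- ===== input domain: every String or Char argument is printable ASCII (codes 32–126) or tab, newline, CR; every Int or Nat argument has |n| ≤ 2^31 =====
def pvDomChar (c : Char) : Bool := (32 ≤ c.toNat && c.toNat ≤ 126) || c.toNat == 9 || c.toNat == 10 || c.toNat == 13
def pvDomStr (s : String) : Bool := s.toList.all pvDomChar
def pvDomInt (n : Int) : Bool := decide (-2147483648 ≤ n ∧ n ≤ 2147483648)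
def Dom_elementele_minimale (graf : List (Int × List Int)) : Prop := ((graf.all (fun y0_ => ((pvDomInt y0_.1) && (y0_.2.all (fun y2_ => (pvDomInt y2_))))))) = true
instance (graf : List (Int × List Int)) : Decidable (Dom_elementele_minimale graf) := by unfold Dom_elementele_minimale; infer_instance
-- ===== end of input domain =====

-- B replaces A's two-set subtraction (keys minus flattened edge targets) by a direct nested
-- membership scan: a node is minimal iff no adjacency list contains it; same node set is returned.


-- ===== PORT A =====
def elementele_minimale (graf : List (Int × List Int)) : List Int :=
  let d := PySem.Dict.ofList graf
  let toate := d.keys.foldl (fun acc nod => acc ++ [nod]) []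
  let frecventa := d.keys.foldl (fun acc nod => acc ++ d.getD nod []) []
  PySem.Set.diff (PySem.Set.ofList toate) (PySem.Set.ofList frecventa)

-- ===== PORT B =====
def elementele_minimale_alt (graf : List (Int × List Int)) : List Int :=
  let d := PySem.Dict.ofList graf
  PySem.Set.ofList
    (d.keys.filter (fun n => !(d.keys.any (fun m => (d.getD m []).contains n))))

-- ===== PRECONDITION & SPEC =====
def Spec_elementele_minimale (graf : List (Int × List Int)) (out : List Int) : Prop := out = elementele_minimale_alt graf
instance (graf : List (Int × List Int)) (out : List Int) : Decidable (Spec_elementele_minimale graf out) := by unfold Spec_elementele_minimale; infer_instance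

-- ===== CLAIM =====
def Claim_equal_elementele_minimale : Prop := ∀ (graf : List (Int × List Int)), Dom_elementele_minimale graf → Spec_elementele_minimale graf (elementele_minimale graf)

-- ===== LEMMAS AND PROOFS =====
-- the loop appending each node's edge list builds exactly the flattened edge list
lemma flat_edges (keys : List Int) (g : Int → List Int) :
    keys.foldl (fun acc nod => acc ++ g nod) ([] : List Int) = (keys.map g).flatten := by
  rw [PySem.List.foldl_append_eq_flatMap]
  simp [List.flatMap]

-- set difference of nodup keys minus targets F = keys filtered by non-membership in F
lemma diff_eq_filter_not_mem (keys F : List Int) (hk : keys.Nodup) :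
    PySem.Set.diff (PySem.Set.ofList keys) (PySem.Set.ofList F)
    = PySem.Set.ofList (keys.filter (fun n => !(decide (n ∈ F)))) := by
  rw [PySem.Set.ofList_eq_self_of_nodup keys hk,
      PySem.Set.ofList_eq_self_of_nodup _ (hk.filter _)]
  simp only [PySem.Set.diff]
  apply List.filter_congr
  intro x hx
  simp [PySem.Set.contains_eq_listContains, PySem.Set.mem_ofList]

lemma main_eq (d : PySem.Dict Int (List Int)) (hk : d.keys.Nodup) :
    PySem.Set.diff
      (PySem.Set.ofList (d.keys.foldl (fun acc nod => acc ++ [nod]) []))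
      (PySem.Set.ofList (d.keys.foldl (fun acc nod => acc ++ d.getD nod []) []))
    = PySem.Set.ofList
        (d.keys.filter (fun n => !(d.keys.any (fun m => (d.getD m []).contains n)))) := by
  have htoate : d.keys.foldl (fun acc nod => acc ++ [nod]) ([] : List Int) = d.keys := by
    rw [PySem.List.foldl_append_singleton]; simp
  rw [htoate, flat_edges d.keys (fun nod => d.getD nod [])]
  rw [diff_eq_filter_not_mem d.keys _ hk]
  congr 1
  apply List.filter_congr
  intro x hx
  rw [Bool.eq_iff_iff]
  simp [List.mem_flatten]

-- ===== VERDICT =====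
theorem elementele_minimale_spec : Claim_equal_elementele_minimale := by
  intro graf _
  unfold Spec_elementele_minimale elementele_minimale elementele_minimale_alt
  exact main_eq (PySem.Dict.ofList graf) (PySem.Dict.nodup_keys_ofList graf)
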